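-- pv_equiv track=rewrite | github.com/adityavs14/Hierarchical-MARL | 3policy/master/metrics.py | compromise_counts
-- ===== SOURCE A (Python) =====
-- def compromise_counts(compromised_status_per_host):
--     compromised = 0
--     noncompromised = 0
--     privileged = 0
--     nonprivileged = 0
--
--     for h in compromised_status_per_host:
--         has_session, has_privileged_session = compromised_status_per_host[h]
--
--         if has_session:
--             compromised += 1
--         else:
--             noncompromised += 1
--
--         if has_privileged_session:
--             privileged += 1
--         else:
--             nonprivileged += 1
--
--     return compromised, noncompromised, privileged, nonprivileged
-- ===== SOURCE B (Python) =====
-- def compromise_counts(compromised_status_per_host):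
--     n = len(compromised_status_per_host)
--     compromised = sum(1 for has_session, _ in compromised_status_per_host.values() if has_session)
--     privileged = sum(1 for _, has_privileged_session in compromised_status_per_host.values() if has_privileged_session)
--     return compromised, n - compromised, privileged, n - privileged
-- ===== Notes on version B (the rewrite author's own statement) =====
-- stated objective: simpler
-- what changed: Replaces the four-counter key-iteration loop (with a dict lookup per key) by two truthy-count generator sums over the values, deriving both 'non' counts by subtraction from len(); Pre_ only excludes association lists with duplicate keys, which cannot arise from a Python dict.
import Mathlib
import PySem

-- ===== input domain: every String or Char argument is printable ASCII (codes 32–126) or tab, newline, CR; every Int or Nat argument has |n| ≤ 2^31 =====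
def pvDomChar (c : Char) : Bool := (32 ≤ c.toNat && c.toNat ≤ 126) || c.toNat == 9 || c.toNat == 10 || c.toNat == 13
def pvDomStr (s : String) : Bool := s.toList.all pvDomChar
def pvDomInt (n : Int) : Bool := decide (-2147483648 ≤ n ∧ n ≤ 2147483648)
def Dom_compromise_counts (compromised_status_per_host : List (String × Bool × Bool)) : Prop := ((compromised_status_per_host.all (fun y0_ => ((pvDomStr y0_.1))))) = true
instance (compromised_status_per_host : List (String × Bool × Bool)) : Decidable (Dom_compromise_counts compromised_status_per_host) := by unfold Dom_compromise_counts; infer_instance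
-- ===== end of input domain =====

-- B replaces A's four-counter key loop by two truthy counts over the values, deriving
-- the 'non' counts by subtraction (objective: simpler).

-- ===== PORT A =====
-- A iterates the dict's keys and looks each key up (d[h] = first match in the
-- association list), maintaining four counters.
def compromise_counts (compromised_status_per_host : List (String × Bool × Bool)) : Int × Int × Int × Int :=
  compromised_status_per_host.foldl
    (fun (st : Int × Int × Int × Int) e =>
      match compromised_status_per_host.find? (fun y => y.1 == e.1) with
      | some y =>
          let st1 : Int × Int × Int × Int :=
            if y.2.1 then (st.1 + 1, st.2.1, st.2.2.1, st.2.2.2)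
            else (st.1, st.2.1 + 1, st.2.2.1, st.2.2.2)
          if y.2.2 then (st1.1, st1.2.1, st1.2.2.1 + 1, st1.2.2.2)
          else (st1.1, st1.2.1, st1.2.2.1, st1.2.2.2 + 1)
      | none => st)  -- unreachable: every iterated key is in the dict
    (0, 0, 0, 0)

-- ===== PORT B =====
def compromise_counts_alt (compromised_status_per_host : List (String × Bool × Bool)) : Int × Int × Int × Int :=
  let n : Int := compromised_status_per_host.length
  let compromised : Int := compromised_status_per_host.countP (fun e => e.2.1)
  let privileged : Int := compromised_status_per_host.countP (fun e => e.2.2)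
  (compromised, n - compromised, privileged, n - privileged)

-- ===== PRECONDITION & SPEC =====
-- Pre_ excludes association lists with duplicate keys: they do not represent any
-- Python dict (A's input is a dict, whose keys are unique), so no input A returns on
-- is excluded.
def Pre_compromise_counts (compromised_status_per_host : List (String × Bool × Bool)) : Prop :=
  (compromised_status_per_host.map Prod.fst).Nodup

instance (compromised_status_per_host : List (String × Bool × Bool)) : Decidable (Pre_compromise_counts compromised_status_per_host) := by unfold Pre_compromise_counts; infer_instance

def pvWitness_compromise_counts : (List (String × Bool × Bool)) :=
  [("a", true, false), ("b", false, true), ("c", true, true)]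

def Spec_compromise_counts (compromised_status_per_host : List (String × Bool × Bool)) (out : Int × Int × Int × Int) : Prop := out = compromise_counts_alt compromised_status_per_host
instance (compromised_status_per_host : List (String × Bool × Bool)) (out : Int × Int × Int × Int) : Decidable (Spec_compromise_counts compromised_status_per_host out) := by unfold Spec_compromise_counts; infer_instance

-- ===== CLAIM (what is proved, stated in full; the proofs are below) =====
def Claim_equal_compromise_counts : Prop := ∀ (compromised_status_per_host : List (String × Bool × Bool)), Dom_compromise_counts compromised_status_per_host → Pre_compromise_counts compromised_status_per_host → Spec_compromise_counts compromised_status_per_host (compromise_counts compromised_status_per_host)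

-- ===== LEMMAS AND PROOFS =====

theorem pvFoldlCongr {α β : Type} (l : List α) (f g : β → α → β) (init : β)
    (h : ∀ acc x, x ∈ l → f acc x = g acc x) : l.foldl f init = l.foldl g init := by
  induction l generalizing init with
  | nil => rfl
  | cons a t ih =>
      simp only [List.foldl_cons]
      rw [h init a (List.mem_cons_self ..)]
      exact ih _ (fun acc x hx => h acc x (List.mem_cons_of_mem _ hx))

-- On a nodup-key list, the first match for e.1 is e itself.
theorem find?_self_of_nodup (xs : List (String × Bool × Bool))
    (h : (xs.map Prod.fst).Nodup) (e : String × Bool × Bool) (he : e ∈ xs) :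
    xs.find? (fun y => y.1 == e.1) = some e := by
  induction xs with
  | nil => cases he
  | cons a t ih =>
      simp only [List.map_cons, List.nodup_cons] at h
      rcases List.mem_cons.mp he with rfl | het
      · simp [List.find?]
      · have hne : a.1 ≠ e.1 := by
          intro hEq
          exact h.1 (hEq ▸ List.mem_map_of_mem het)
        simp only [List.find?]
        rw [show (a.1 == e.1) = false from beq_eq_false_iff_ne.mpr hne]
        exact ih h.2 het

-- The de-lookup'd loop body.
def pvStep (st : Int × Int × Int × Int) (e : String × Bool × Bool) : Int × Int × Int × Int :=
  let st1 : Int × Int × Int × Int :=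
    if e.2.1 then (st.1 + 1, st.2.1, st.2.2.1, st.2.2.2)
    else (st.1, st.2.1 + 1, st.2.2.1, st.2.2.2)
  if e.2.2 then (st1.1, st1.2.1, st1.2.2.1 + 1, st1.2.2.2)
  else (st1.1, st1.2.1, st1.2.2.1, st1.2.2.2 + 1)

theorem foldl_pvStep (l : List (String × Bool × Bool)) (a b c d : Int) :
    l.foldl pvStep (a, b, c, d) =
      (a + l.countP (fun e => e.2.1),
       b + ((l.length : Int) - l.countP (fun e => e.2.1)),
       c + l.countP (fun e => e.2.2),
       d + ((l.length : Int) - l.countP (fun e => e.2.2))) := by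
  induction l generalizing a b c d with
  | nil => simp
  | cons x t ih =>
      simp only [List.foldl_cons, List.countP_cons, List.length_cons]
      by_cases h1 : x.2.1 = true <;> by_cases h2 : x.2.2 = true <;>
        simp only [pvStep, h1, h2, if_true, Bool.not_eq_true] at * <;>
        rw [ih] <;>
        refine Prod.ext ?_ (Prod.ext ?_ (Prod.ext ?_ ?_)) <;>
        simp <;> omega

-- ===== VERDICT (by name: the statement is the Claim_ definition above) =====
theorem compromise_counts_spec : Claim_equal_compromise_counts := by
  intro xs _ hpre
  unfold Spec_compromise_counts compromise_counts compromise_counts_alt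
  rw [pvFoldlCongr xs _ pvStep _ (fun acc e he => by
    simp only [find?_self_of_nodup xs hpre e he]; rfl)]
  rw [foldl_pvStep]
  simp
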